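-- pv_equiv track=rewrite | github.com/Liros999/Tools | Genome_Analyzer/src/Genome_Analyzer.py | _search_optimized_sliding_window
-- ===== SOURCE A (Python) =====
-- from typing import Dict, List, Tuple, Optional, Union, Any
--
-- def _search_optimized_sliding_window(text: str, pattern: str, max_mismatches: int) -> List[Tuple]:
--     """
--     Optimized sliding window search with early termination.
--     This is faster than the flawed Bitap implementation and more reliable.
--     """
--     matches = []
--     pattern_len = len(pattern)
--     text_len = len(text)
--
--     if pattern_len > text_len:
--         return []
--
--     for i in range(text_len - pattern_len + 1):
--         mismatches = 0
--         early_terminate = False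
--
--         # Early termination: if we exceed max_mismatches, stop checking this window
--         for j in range(pattern_len):
--             if text[i + j] != pattern[j]:
--                 mismatches += 1
--                 if mismatches > max_mismatches:
--                     early_terminate = True
--                     break
--
--         if not early_terminate and mismatches <= max_mismatches:
--             # Return format: (start, end, pattern, False, mismatches, 0) to match expected 6-element format
--             matches.append((i + 1, i + pattern_len, pattern, False, mismatches, 0))
--
--     return matches
-- ===== SOURCE B (Python) =====
-- def _search_optimized_sliding_window(text: str, pattern: str, max_mismatches: int):
--     """Column-wise mismatch counting: one pass per pattern position updates a
--     per-window mismatch-count array; no per-window inner scan with early break."""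
--     m = len(pattern)
--     n = len(text)
--     if m > n:
--         return []
--     L = n - m + 1
--     counts = [0] * L
--     for j, pc in enumerate(pattern):
--         for i in range(L):
--             if text[i + j] != pc:
--                 counts[i] += 1
--     return [(i + 1, i + m, pattern, False, c, 0)
--             for i, c in enumerate(counts) if c <= max_mismatches]
-- ===== Notes on version B (the rewrite author's own statement) =====
-- stated objective: alternative
-- what changed: B replaces A's per-window inner scan with early termination by column-wise counting: one pass per pattern position j increments a per-window mismatch-count array, then windows with count <= max_mismatches are emitted in a final comprehension.
import Mathlib
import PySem

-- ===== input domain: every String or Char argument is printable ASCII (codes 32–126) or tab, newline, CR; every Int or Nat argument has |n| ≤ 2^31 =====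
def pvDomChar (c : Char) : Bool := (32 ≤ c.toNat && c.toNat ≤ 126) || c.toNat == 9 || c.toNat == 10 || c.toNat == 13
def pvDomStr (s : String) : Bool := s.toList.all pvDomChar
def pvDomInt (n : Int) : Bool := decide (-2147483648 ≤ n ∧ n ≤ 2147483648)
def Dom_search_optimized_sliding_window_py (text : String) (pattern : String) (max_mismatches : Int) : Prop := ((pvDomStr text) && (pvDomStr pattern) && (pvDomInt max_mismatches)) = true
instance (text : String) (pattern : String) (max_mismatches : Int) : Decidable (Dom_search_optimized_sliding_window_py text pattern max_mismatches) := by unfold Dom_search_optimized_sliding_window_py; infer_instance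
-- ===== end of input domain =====

-- B replaces A's per-window scan with early break by column-wise mismatch counting
-- (one pass per pattern position over a per-window count array); objective: alternative.

-- ===== PORT A =====
-- inner 'for j in range(pattern_len)' loop of A, with its break:
-- the Int is the running mismatch counter, the Bool is early_terminate.
def pvAInner (tl pl : List Char) (i k : Int) : List Int → Int → Int × Bool
  | [], m => (m, false)
  | j :: js, m =>
      if PySem.List.pyGet? tl (i + j) ≠ PySem.List.pyGet? pl j then
        if m + 1 > k then (m + 1, true) else pvAInner tl pl i k js (m + 1)
      else pvAInner tl pl i k js m

def search_optimized_sliding_window_py (text : String) (pattern : String) (max_mismatches : Int) : List (Int × Int × String × Bool × Int × Int) :=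
  let pattern_len := PySem.Str.len pattern
  let text_len := PySem.Str.len text
  if pattern_len > text_len then [] else
    (PySem.List.pyRange 0 (text_len - pattern_len + 1) 1).foldl (fun acc i =>
      let r := pvAInner text.toList pattern.toList i max_mismatches
                 (PySem.List.pyRange 0 pattern_len 1) 0
      if r.2 = false ∧ r.1 ≤ max_mismatches then
        acc ++ [(i + 1, i + pattern_len, pattern, false, r.1, 0)]
      else acc) []

-- ===== PORT B =====
-- one column pass of B: 'for i in range(L): if text[i + j] != pc: counts[i] += 1'
def pvBStep (tl : List Char) (L : Int) (j : Int) (pc : Char) (counts : List Int) : List Int :=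
  (PySem.List.pyRange 0 L 1).foldl (fun cs i =>
    if PySem.List.pyGet? tl (i + j) ≠ some pc then
      PySem.List.pySetD cs i (PySem.List.pyGetD cs i 0 + 1)
    else cs) counts

def search_optimized_sliding_window_py_alt (text : String) (pattern : String) (max_mismatches : Int) : List (Int × Int × String × Bool × Int × Int) :=
  let m := PySem.Str.len pattern
  let n := PySem.Str.len text
  if m > n then [] else
    let L := n - m + 1
    let counts0 := List.replicate L.toNat (0 : Int)
    let counts := (PySem.List.enumerate pattern.toList 0).foldl
      (fun cs jp => pvBStep text.toList L jp.1 jp.2 cs) counts0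
    (PySem.List.enumerate counts 0).foldl (fun acc ic =>
      if ic.2 ≤ max_mismatches then acc ++ [(ic.1 + 1, ic.1 + m, pattern, false, ic.2, 0)]
      else acc) []

-- ===== PRECONDITION & SPEC =====
def Spec_search_optimized_sliding_window_py (text : String) (pattern : String) (max_mismatches : Int) (out : List (Int × Int × String × Bool × Int × Int)) : Prop := out = search_optimized_sliding_window_py_alt text pattern max_mismatches
instance (text : String) (pattern : String) (max_mismatches : Int) (out : List (Int × Int × String × Bool × Int × Int)) : Decidable (Spec_search_optimized_sliding_window_py text pattern max_mismatches out) := by unfold Spec_search_optimized_sliding_window_py; infer_instance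

-- ===== CLAIM (what is proved, stated in full; the proofs are below) =====
def Claim_equal_search_optimized_sliding_window_py : Prop := ∀ (text : String) (pattern : String) (max_mismatches : Int), Dom_search_optimized_sliding_window_py text pattern max_mismatches → Spec_search_optimized_sliding_window_py text pattern max_mismatches (search_optimized_sliding_window_py text pattern max_mismatches)

-- ===== LEMMAS AND PROOFS =====

-- number of mismatches of window i against the pattern suffix pcs placed at offset s
def pvCnt (tl : List Char) : List Char → Int → Int → Int
  | [], _, _ => 0
  | pc :: rest, i, s =>
      (if PySem.List.pyGet? tl (i + s) ≠ some pc then 1 else 0) + pvCnt tl rest i (s + 1)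

lemma pvCnt_nonneg (tl : List Char) : ∀ (pcs : List Char) (i s : Int), 0 ≤ pvCnt tl pcs i s := by
  intro pcs
  induction pcs with
  | nil => intro i s; simp [pvCnt]
  | cons pc rest ih =>
      intro i s
      have := ih i (s + 1)
      simp only [pvCnt]
      split <;> omega

lemma pvAInner_spec (tl : List Char) (i k : Int) :
    ∀ (pcs pre : List Char) (m : Int),
      (pvAInner tl (pre ++ pcs) i k
          (PySem.List.pyRange (pre.length : Int) (((pre ++ pcs).length : Nat) : Int) 1) m
        = (m + pvCnt tl pcs i (pre.length : Int), false))
      ∨ ((pvAInner tl (pre ++ pcs) i k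
          (PySem.List.pyRange (pre.length : Int) (((pre ++ pcs).length : Nat) : Int) 1) m).2 = true
        ∧ k < m + pvCnt tl pcs i (pre.length : Int)) := by
  intro pcs
  induction pcs with
  | nil =>
      intro pre m
      left
      rw [PySem.List.pyRange_one_eq_nil (by simp)]
      simp [pvAInner, pvCnt]
  | cons pc rest ih =>
      intro pre m
      have hlt : (pre.length : Int) < (((pre ++ pc :: rest).length : Nat) : Int) := by
        simp
      rw [PySem.List.pyRange_one_cons hlt]
      have hget : PySem.List.pyGet? (pre ++ pc :: rest) (pre.length : Int) = some pc :=
        PySem.List.pyGet?_append_length pre rest pc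
      simp only [pvAInner, hget]
      have hre : (pre ++ [pc]) ++ rest = pre ++ pc :: rest := by simp
      have hlen : (((pre ++ [pc]).length : Nat) : Int) = (pre.length : Int) + 1 := by simp
      by_cases hmis : PySem.List.pyGet? tl (i + (pre.length : Int)) ≠ some pc
      · rw [if_pos hmis]
        by_cases hk : m + 1 > k
        · rw [if_pos hk]
          right
          refine ⟨rfl, ?_⟩
          have := pvCnt_nonneg tl rest i ((pre.length : Int) + 1)
          simp only [pvCnt, if_pos hmis]
          omega
        · rw [if_neg hk]
          have h := ih (pre ++ [pc]) (m + 1)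
          rw [hre, hlen] at h
          simp only [pvCnt, if_pos hmis]
          rcases h with h | h
          · left
            rw [h]
            have : m + 1 + pvCnt tl rest i ((pre.length : Int) + 1)
                = m + (1 + pvCnt tl rest i ((pre.length : Int) + 1)) := by omega
            rw [this]
          · right; exact ⟨h.1, by omega⟩
      · rw [if_neg hmis]
        have h := ih (pre ++ [pc]) m
        rw [hre, hlen] at h
        simp only [pvCnt, if_neg hmis]
        rcases h with h | h
        · left
          rw [h]
          have : m + pvCnt tl rest i ((pre.length : Int) + 1)
              = m + (0 + pvCnt tl rest i ((pre.length : Int) + 1)) := by omega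
          rw [← this]
        · right; exact ⟨h.1, by omega⟩

lemma pvSetMid (pre : List Int) (v w : Int) (l : List Int) :
    (pre ++ v :: l).set pre.length w = pre ++ w :: l := by simp

lemma pvGetMid (pre : List Int) (v : Int) (l : List Int) :
    (pre ++ v :: l).getD pre.length 0 = v := by simp

lemma pvBStep_gen (tl : List Char) (j : Int) (pc : Char) :
    ∀ (n : Nat) (pre : List Int) (g : Int → Int),
      (PySem.List.pyRange (pre.length : Int) ((pre.length : Int) + (n : Int)) 1).foldl
        (fun cs i => if PySem.List.pyGet? tl (i + j) ≠ some pc then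
            PySem.List.pySetD cs i (PySem.List.pyGetD cs i 0 + 1) else cs)
        (pre ++ (PySem.List.pyRange (pre.length : Int) ((pre.length : Int) + (n : Int)) 1).map g)
      = pre ++ (PySem.List.pyRange (pre.length : Int) ((pre.length : Int) + (n : Int)) 1).map
          (fun i => if PySem.List.pyGet? tl (i + j) ≠ some pc then g i + 1 else g i) := by
  intro n
  induction n with
  | zero =>
      intro pre g
      rw [PySem.List.pyRange_one_eq_nil (by simp)]
      simp
  | succ n ih =>
      intro pre g
      have hlt : (pre.length : Int) < (pre.length : Int) + ((n + 1 : Nat) : Int) := by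
        push_cast; omega
      have hrest : (pre.length : Int) + ((n + 1 : Nat) : Int)
          = (((pre.length : Int) + 1)) + ((n : Nat) : Int) := by push_cast; ring
      rw [PySem.List.pyRange_one_cons hlt, hrest]
      simp only [List.map_cons, List.foldl_cons]
      set v : Int := if PySem.List.pyGet? tl ((pre.length : Int) + j) ≠ some pc
          then g (pre.length : Int) + 1 else g (pre.length : Int) with hv
      have hstate :
          (if PySem.List.pyGet? tl ((pre.length : Int) + j) ≠ some pc then
              PySem.List.pySetD
                (pre ++ g (pre.length : Int) ::
                  (PySem.List.pyRange ((pre.length : Int) + 1)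
                    ((pre.length : Int) + 1 + ((n : Nat) : Int)) 1).map g)
                (pre.length : Int)
                (PySem.List.pyGetD
                  (pre ++ g (pre.length : Int) ::
                    (PySem.List.pyRange ((pre.length : Int) + 1)
                      ((pre.length : Int) + 1 + ((n : Nat) : Int)) 1).map g)
                  (pre.length : Int) 0 + 1)
            else pre ++ g (pre.length : Int) ::
                  (PySem.List.pyRange ((pre.length : Int) + 1)
                    ((pre.length : Int) + 1 + ((n : Nat) : Int)) 1).map g)
          = pre ++ v ::
              (PySem.List.pyRange ((pre.length : Int) + 1)
                ((pre.length : Int) + 1 + ((n : Nat) : Int)) 1).map g := by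
        rw [hv]
        split
        · rw [PySem.List.pyGetD_natCast, PySem.List.pySetD_natCast, pvGetMid, pvSetMid]
        · rfl
      rw [hstate]
      have hlen1 : ((pre ++ [v]).length : Int) = (pre.length : Int) + 1 := by simp
      have h := ih (pre ++ [v]) g
      rw [hlen1] at h
      simp only [List.append_assoc, List.singleton_append] at h
      rw [h]

lemma pvCounts_spec (tl : List Char) (L : Nat) :
    ∀ (pcs : List Char) (s : Nat) (g : Int → Int),
      (PySem.List.enumerate pcs (s : Int)).foldl
          (fun cs jp => pvBStep tl (L : Int) jp.1 jp.2 cs)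
          ((PySem.List.pyRange 0 (L : Int) 1).map g)
      = (PySem.List.pyRange 0 (L : Int) 1).map (fun i => g i + pvCnt tl pcs i (s : Int)) := by
  intro pcs
  induction pcs with
  | nil =>
      intro s g
      simp [pvCnt]
  | cons pc rest ih =>
      intro s g
      rw [PySem.List.enumerate_cons]
      simp only [List.foldl_cons]
      have hstep : pvBStep tl (L : Int) (s : Int) pc ((PySem.List.pyRange 0 (L : Int) 1).map g)
          = (PySem.List.pyRange 0 (L : Int) 1).map
              (fun i => if PySem.List.pyGet? tl (i + (s : Int)) ≠ some pc then g i + 1 else g i) := by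
        unfold pvBStep
        have h := pvBStep_gen tl (s : Int) pc L ([] : List Int) g
        simpa using h
      rw [hstep]
      have h := ih (s + 1) (fun i => if PySem.List.pyGet? tl (i + (s : Int)) ≠ some pc then g i + 1 else g i)
      have hs1 : (((s + 1 : Nat)) : Int) = (s : Int) + 1 := by push_cast; ring
      rw [hs1] at h
      rw [h]
      refine List.map_congr_left ?_
      intro i _
      simp only [pvCnt]
      split <;> omega

lemma pvEnumMap {α : Type} (g : Int → α) :
    ∀ (n : Nat) (s : Int),
      PySem.List.enumerate ((PySem.List.pyRange s (s + (n : Int)) 1).map g) s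
        = (PySem.List.pyRange s (s + (n : Int)) 1).map (fun i => (i, g i)) := by
  intro n
  induction n with
  | zero =>
      intro s
      rw [PySem.List.pyRange_one_eq_nil (by simp)]
      simp
  | succ n ih =>
      intro s
      have hlt : s < s + ((n + 1 : Nat) : Int) := by push_cast; omega
      have hrest : s + ((n + 1 : Nat) : Int) = (s + 1) + ((n : Nat) : Int) := by push_cast; ring
      rw [PySem.List.pyRange_one_cons hlt, hrest]
      simp only [List.map_cons]
      rw [PySem.List.enumerate_cons, ih (s + 1)]

-- ===== VERDICT (by name: the statement is the Claim_ definition above) =====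
theorem search_optimized_sliding_window_py_spec : Claim_equal_search_optimized_sliding_window_py := by
  intro text pattern k _
  unfold Spec_search_optimized_sliding_window_py
  simp only [search_optimized_sliding_window_py, search_optimized_sliding_window_py_alt,
    PySem.Str.len_eq]
  set tl := text.toList with htl
  set pl := pattern.toList with hpl
  by_cases hgt : ((pl.length : Nat) : Int) > ((tl.length : Nat) : Int)
  · rw [if_pos hgt, if_pos hgt]
  · rw [if_neg hgt, if_neg hgt]
    have hple : pl.length ≤ tl.length := by exact_mod_cast not_lt.mp hgt
    set L : Nat := tl.length - pl.length + 1 with hLdef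
    have hL : ((tl.length : Int) - (pl.length : Int) + 1) = ((L : Nat) : Int) := by
      rw [hLdef]; push_cast; omega
    rw [hL]
    -- B side: counts array characterisation
    have hrep : List.replicate ((L : Int)).toNat (0 : Int)
        = (PySem.List.pyRange 0 (L : Int) 1).map (fun _ => 0) := by
      simp [PySem.List.length_pyRange_one]
    rw [hrep]
    have hc := pvCounts_spec tl L pl 0 (fun _ => 0)
    simp only [Nat.cast_zero, zero_add] at hc
    rw [hc]
    have henum := pvEnumMap (fun i => pvCnt tl pl i 0) L 0
    simp only [zero_add] at henum
    rw [henum, List.foldl_map]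
    -- A side: each window body agrees with B's
    refine PySem.List.foldl_congr_mem _ _ _ _ ?_
    intro acc i _
    have h := pvAInner_spec tl i k pl [] 0
    simp only [List.nil_append, List.length_nil, Nat.cast_zero] at h
    rcases h with h | h
    · rw [h]
      by_cases hc : pvCnt tl pl i 0 ≤ k
      · simp [hc]
      · simp [hc]
    · have hcond : ¬ ((pvAInner tl pl i k (PySem.List.pyRange 0 ((pl.length : Nat) : Int) 1) 0).2 = false
          ∧ (pvAInner tl pl i k (PySem.List.pyRange 0 ((pl.length : Nat) : Int) 1) 0).1 ≤ k) := by
        intro hco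
        rw [h.1] at hco
        exact Bool.noConfusion hco.1
      have h2' : ¬ pvCnt tl pl i 0 ≤ k := by
        have := h.2
        omega
      have h2 : ¬ ((i, pvCnt tl pl i 0) : Int × Int).2 ≤ k := h2'
      rw [if_neg hcond, if_neg h2]
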